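-- pv_equiv track=rewrite | github.com/pombredanne/farach-suffix-tree | thuestrings.py | generate_3_2
-- ===== SOURCE A (Python) =====
-- def generate_3_2(n):
--     ''' thue string (3,2), generates strings over an alphabet of size 3
--         with no repetitions, i.e. no character is followed by an identical
--         character immediately '''
--     morphisms = {}
--     morphisms['a'] = 'abcab'
--     morphisms['b'] = 'acabcb'
--     morphisms['c'] = 'acbcacb'
--
--     t_i = 'a'
--     for _ in range(n):
--         t_j = []
--         for char in t_i:
--             t_j.append(morphisms[char])
--         t_i = ''.join(t_j)
--     return t_i
-- ===== SOURCE B (Python) =====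
-- def generate_3_2(n):
--     ''' thue string (3,2): instead of rewriting the whole string n times,
--         recursively build the level-k expansion of each single letter
--         (a 3-entry table), then read off the expansion of 'a' '''
--     morphisms = {'a': 'abcab', 'b': 'acabcb', 'c': 'acbcacb'}
--
--     def expansions(level):
--         if level <= 0:
--             return {c: c for c in 'abc'}
--         prev = expansions(level - 1)
--         return {c: ''.join(prev[d] for d in morphisms[c]) for c in 'abc'}
--
--     return expansions(n)['a']
-- ===== Notes on version B (the rewrite author's own statement) =====
-- stated objective: alternative
-- what changed: Replaces the breadth-first loop that rewrites the whole string n times with a depth-first recursive expand(char, level) that expands the start symbol down the morphism tree.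
import Mathlib
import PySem

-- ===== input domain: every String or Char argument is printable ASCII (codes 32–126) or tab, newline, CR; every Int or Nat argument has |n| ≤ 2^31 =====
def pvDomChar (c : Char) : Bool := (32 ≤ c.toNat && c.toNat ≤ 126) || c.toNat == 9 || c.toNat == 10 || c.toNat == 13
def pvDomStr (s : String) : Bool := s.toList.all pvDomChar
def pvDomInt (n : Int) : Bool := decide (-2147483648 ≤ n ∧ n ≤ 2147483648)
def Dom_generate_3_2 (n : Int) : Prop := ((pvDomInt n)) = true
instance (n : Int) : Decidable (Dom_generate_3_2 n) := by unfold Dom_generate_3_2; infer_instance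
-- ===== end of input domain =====

-- B replaces A's "rewrite the whole string n times" loop with a recursion on the level that
-- builds the 3-entry table of per-letter expansions and reads off 'a' (objective: alternative).

-- ===== PORT A =====
def pvMorphA : PySem.Dict Char String :=
  ((PySem.Dict.empty.insert 'a' "abcab").insert 'b' "acabcb").insert 'c' "acbcacb"

def generate_3_2 (n : Int) : String :=
  (PySem.List.pyRange 0 n 1).foldl
    (fun t_i _ =>
      -- t_j = []; for char in t_i: t_j.append(morphisms[char]); t_i = ''.join(t_j)
      PySem.Str.join "" (t_i.toList.map (fun c => (pvMorphA.get? c).getD "")))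
    "a"

-- ===== PORT B =====
-- Source B defines the same `morphisms` literal as Source A; the identical constant `pvMorphA` is shared.
/-- Source B's `expansions(level)`: the dict mapping each letter to its level-fold expansion. -/
def pvExpansions (level : Int) : PySem.Dict Char String :=
  if level ≤ 0 then
    PySem.Dict.ofList (("abc".toList).map (fun c => (c, String.ofList [c])))
  else
    let prev := pvExpansions (level - 1)
    PySem.Dict.ofList (("abc".toList).map (fun c =>
      (c, PySem.Str.join ""
            (((pvMorphA.get? c).getD "").toList.map (fun d => (prev.get? d).getD "")))))
termination_by level.toNat
decreasing_by omega

def generate_3_2_alt (n : Int) : String := ((pvExpansions n).get? 'a').getD ""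

-- ===== PRECONDITION & SPEC =====
def Spec_generate_3_2 (n : Int) (out : String) : Prop := out = generate_3_2_alt n
instance (n : Int) (out : String) : Decidable (Spec_generate_3_2 n out) := by unfold Spec_generate_3_2; infer_instance

-- ===== CLAIM (what is proved, stated in full; the proofs are below) =====
def Claim_equal_generate_3_2 : Prop := ∀ (n : Int), Dom_generate_3_2 n → Spec_generate_3_2 n (generate_3_2 n)

-- ===== LEMMAS AND PROOFS =====

/-- The morphism as a function on characters (proof helper). -/
def pvMorphL (c : Char) : List Char := ((pvMorphA.get? c).getD "").toList

/-- One rewriting pass of A on the character list. -/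
def pvStepL (l : List Char) : List Char := l.flatMap pvMorphL

/-- The level-`k` expansion of a single letter, by Nat recursion (proof helper). -/
def pvExpandL : Nat → Char → List Char
  | 0, c => [c]
  | k + 1, c => (pvMorphL c).flatMap (pvExpandL k)

theorem pv_intercalate_nil (xss : List (List Char)) :
    List.intercalate ([] : List Char) xss = xss.flatten := by
  induction xss with
  | nil => rfl
  | cons x xs ih =>
      cases xs with
      | nil => simp [List.intercalate]
      | cons y ys => simp_all [List.intercalate, List.intersperse]

theorem foldl_const_iterate {α β : Type} (g : α → α) (l : List β) (s : α) :
    l.foldl (fun t _ => g t) s = g^[l.length] s := by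
  induction l generalizing s with
  | nil => rfl
  | cons x xs ih => simpa [Function.iterate_succ_apply] using ih (g s)

theorem toList_step (s : String) :
    (PySem.Str.join "" (s.toList.map (fun c => (pvMorphA.get? c).getD ""))).toList
      = pvStepL s.toList := by
  rw [PySem.Str.toList_join]
  simp [PySem.Chars.join, pv_intercalate_nil, pvStepL, List.flatMap_def]
  rfl

theorem toList_generate (n : Int) :
    (generate_3_2 n).toList = pvStepL^[n.toNat] (['a']) := by
  unfold generate_3_2
  rw [foldl_const_iterate]
  have hlen : (PySem.List.pyRange 0 n 1).length = n.toNat := by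
    simp [PySem.List.pyRange]; omega
  rw [hlen]
  induction n.toNat with
  | zero => rfl
  | succ k ih =>
      rw [Function.iterate_succ_apply', Function.iterate_succ_apply', toList_step, ih]

theorem iterate_step_flatMap (k : Nat) (l : List Char) :
    pvStepL^[k] l = l.flatMap (pvExpandL k) := by
  induction k generalizing l with
  | zero => simp [pvExpandL]
  | succ k ih =>
      rw [Function.iterate_succ_apply, ih]
      simp [pvStepL, pvExpandL, List.flatMap_assoc]

/-- Joining the table's entries along a word over {a,b,c} is `flatMap` of the expansions. -/
theorem pv_join_row (prev : PySem.Dict Char String) (k : Nat)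
    (hprev : ∀ d ∈ (['a', 'b', 'c'] : List Char), ((prev.get? d).getD "").toList = pvExpandL k d)
    (ms : List Char) (hms : ∀ d ∈ ms, d ∈ (['a', 'b', 'c'] : List Char)) :
    (PySem.Str.join "" (ms.map (fun d => (prev.get? d).getD ""))).toList
      = ms.flatMap (pvExpandL k) := by
  rw [PySem.Str.toList_join]
  simp [PySem.Chars.join, pv_intercalate_nil, List.flatMap_def]
  congr 1
  apply List.map_congr_left
  intro d hd
  exact hprev d (hms d hd)

theorem pv_toList_abcab : ("abcab".toList : List Char) = ['a', 'b', 'c', 'a', 'b'] := rfl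
theorem pv_toList_acabcb : ("acabcb".toList : List Char) = ['a', 'c', 'a', 'b', 'c', 'b'] := rfl
theorem pv_toList_acbcacb : ("acbcacb".toList : List Char) = ['a', 'c', 'b', 'c', 'a', 'c', 'b'] := rfl

theorem pv_row_get (k : Nat) : ∀ (level : Int), level.toNat = k →
    ∀ c ∈ (['a', 'b', 'c'] : List Char),
      (((pvExpansions level).get? c).getD "").toList = pvExpandL k c := by
  induction k with
  | zero =>
      intro level h c hc
      rw [pvExpansions]
      have hle : level ≤ 0 := by omega
      simp only [if_pos hle]
      fin_cases hc <;> decide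
  | succ k ih =>
      intro level h c hc
      rw [pvExpansions]
      have hpos : ¬ level ≤ 0 := by omega
      simp only [if_neg hpos]
      have hprev : ∀ d ∈ (['a', 'b', 'c'] : List Char),
          (((pvExpansions (level - 1)).get? d).getD "").toList = pvExpandL k d :=
        fun d hd => ih (level - 1) (by omega) d hd
      fin_cases hc
      · have hg : (((PySem.Dict.ofList (("abc".toList).map (fun c =>
            (c, PySem.Str.join "" (((pvMorphA.get? c).getD "").toList.map
              (fun d => ((pvExpansions (level - 1)).get? d).getD "")))))).get? 'a').getD "")
            = PySem.Str.join "" (("abcab".toList).map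
                (fun d => ((pvExpansions (level - 1)).get? d).getD "")) := by
          simp [PySem.Dict.ofList, PySem.Dict.update, PySem.Dict.get?_insert, pvMorphA]
        rw [hg, pv_join_row _ k hprev _
          (by rw [pv_toList_abcab]; intro d hd; fin_cases hd <;> simp)]
        simp [pvExpandL]
        rw [show pvMorphL 'a' = ['a', 'b', 'c', 'a', 'b'] from rfl]
        simp
      · have hg : (((PySem.Dict.ofList (("abc".toList).map (fun c =>
            (c, PySem.Str.join "" (((pvMorphA.get? c).getD "").toList.map
              (fun d => ((pvExpansions (level - 1)).get? d).getD "")))))).get? 'b').getD "")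
            = PySem.Str.join "" (("acabcb".toList).map
                (fun d => ((pvExpansions (level - 1)).get? d).getD "")) := by
          simp [PySem.Dict.ofList, PySem.Dict.update, PySem.Dict.get?_insert, pvMorphA]
        rw [hg, pv_join_row _ k hprev _
          (by rw [pv_toList_acabcb]; intro d hd; fin_cases hd <;> simp)]
        simp [pvExpandL]
        rw [show pvMorphL 'b' = ['a', 'c', 'a', 'b', 'c', 'b'] from rfl]
        simp
      · have hg : (((PySem.Dict.ofList (("abc".toList).map (fun c =>
            (c, PySem.Str.join "" (((pvMorphA.get? c).getD "").toList.map
              (fun d => ((pvExpansions (level - 1)).get? d).getD "")))))).get? 'c').getD "")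
            = PySem.Str.join "" (("acbcacb".toList).map
                (fun d => ((pvExpansions (level - 1)).get? d).getD "")) := by
          simp [PySem.Dict.ofList, PySem.Dict.update, PySem.Dict.get?_insert, pvMorphA]
        rw [hg, pv_join_row _ k hprev _
          (by rw [pv_toList_acbcacb]; intro d hd; fin_cases hd <;> simp)]
        simp [pvExpandL]
        rw [show pvMorphL 'c' = ['a', 'c', 'b', 'c', 'a', 'c', 'b'] from rfl]
        simp

theorem toList_eq (n : Int) : (generate_3_2 n).toList = (generate_3_2_alt n).toList := by
  rw [toList_generate, iterate_step_flatMap]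
  unfold generate_3_2_alt
  rw [pv_row_get n.toNat n rfl 'a' (by decide)]
  simp

-- ===== VERDICT (by name: the statement is the Claim_ definition above) =====
theorem generate_3_2_spec : Claim_equal_generate_3_2 := by
  intro n _
  unfold Spec_generate_3_2
  have h := toList_eq n
  exact String.ext (by simpa [String.toList] using h)
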